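-- pv_equiv track=rewrite | github.com/jasonjiao2024/tsle-sleep-simulation | analysis/transition_dynamics.py | detect_sleep_onset
-- ===== SOURCE A (Python) =====
-- from typing import Dict, List, Tuple, Optional
--
-- def detect_sleep_onset(
--
--     hypnogram: List[str],
--     min_consecutive: int = 3
-- ) -> Optional[int]:
--     """
--     Detect sleep onset (first sustained sleep).
--
--     Args:
--         hypnogram: List of sleep stage labels
--         min_consecutive: Minimum consecutive non-Wake epochs to count as onset
--
--     Returns:
--         Epoch index of sleep onset, or None if no sleep detected
--     """
--     consecutive_sleep = 0
--
--     for i, stage in enumerate(hypnogram):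
--         if stage != 'Wake':
--             consecutive_sleep += 1
--             if consecutive_sleep >= min_consecutive:
--                 return i - min_consecutive + 1
--         else:
--             consecutive_sleep = 0
--
--     return None
-- ===== SOURCE B (Python) =====
-- from typing import List, Optional
--
--
-- def detect_sleep_onset(
--     hypnogram: List[str],
--     min_consecutive: int = 3
-- ) -> Optional[int]:
--     """Scan maximal runs: jump run-by-run and return the start index of the
--     first maximal non-Wake run whose length reaches min_consecutive."""
--     n = len(hypnogram)
--     offset = 0
--     while offset < n:
--         is_sleep = hypnogram[offset] != 'Wake'
--         end = offset + 1
--         while end < n and (hypnogram[end] != 'Wake') == is_sleep: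
--             end += 1
--         if is_sleep and end - offset >= min_consecutive:
--             return offset
--         offset = end
--     return None
-- ===== Notes on version B (the rewrite author's own statement) =====
-- stated objective: alternative
-- what changed: B scans maximal runs (finding each run's end index with an inner scan and jumping run-to-run) instead of A's per-element consecutive counter, returning the start offset of the first qualifying sleep run.
-- intended difference: When min_consecutive <= 0 and the hypnogram contains a non-Wake epoch, A returns firstSleepIndex + 1 - min_consecutive (an index past the onset, possibly out of range), while B returns the first non-Wake index itself, which is the intended onset when the threshold is degenerate. — e.g. on detect_sleep_onset(["Wake", "N2"], 0): A returns some 2, B returns some 1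
import Mathlib
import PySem

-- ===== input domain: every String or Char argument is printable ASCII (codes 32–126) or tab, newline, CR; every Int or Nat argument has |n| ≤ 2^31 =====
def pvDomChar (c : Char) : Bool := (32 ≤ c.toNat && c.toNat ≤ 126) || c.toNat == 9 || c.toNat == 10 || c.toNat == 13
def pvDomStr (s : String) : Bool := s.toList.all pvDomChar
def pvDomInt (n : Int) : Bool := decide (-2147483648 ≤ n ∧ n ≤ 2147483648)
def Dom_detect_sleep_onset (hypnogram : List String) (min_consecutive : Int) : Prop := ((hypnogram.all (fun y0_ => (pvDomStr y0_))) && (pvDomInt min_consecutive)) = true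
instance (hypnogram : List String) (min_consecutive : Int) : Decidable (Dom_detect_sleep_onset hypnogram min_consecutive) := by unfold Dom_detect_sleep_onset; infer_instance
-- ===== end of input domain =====

-- B replaces A's per-element consecutive counter by a run-by-run scan (inner scan finds each
-- maximal run's end, outer loop jumps run to run); same O(n) cost, different decomposition.

-- ===== PORT A =====
-- the for-loop of A: i is the enumerate index, c the running consecutive_sleep counter
def goA (h : List String) (i : Int) (c : Int) (m : Int) : Option Int :=
  match h with
  | [] => none
  | s :: t =>
    if s != "Wake" then
      if c + 1 ≥ m then some (i - m + 1) else goA t (i + 1) (c + 1) m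
    else goA t (i + 1) 0 m

def detect_sleep_onset (hypnogram : List String) (min_consecutive : Int) : Option Int :=
  goA hypnogram 0 0 min_consecutive

-- ===== PORT B =====
-- key of an epoch: `s != 'Wake'` (is it sleep)
def pvKey (s : String) : Bool := s != "Wake"

-- inner while-loop of B: advance e while in range and the key matches k; returns the final e.
-- (Source B indexes hypnogram[end] only after checking end < n, so the guarded getElem is exact)
def runEnd (h : List String) (k : Bool) (e : Nat) : Nat :=
  if hlt : e < h.length then
    if pvKey h[e] == k then runEnd h k (e + 1) else e
  else e
termination_by h.length - e

-- used by goB's termination: runEnd never moves backwards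
theorem runEnd_ge (h : List String) (k : Bool) (e : Nat) : e ≤ runEnd h k e := by
  unfold runEnd
  split
  · split
    · exact le_trans (by omega) (runEnd_ge h k (e + 1))
    · exact le_refl e
  · exact le_refl e
termination_by h.length - e

-- outer while-loop of B (Source B's `end` assignment inlined at its two uses)
def goB (h : List String) (m : Int) (offset : Nat) : Option Int :=
  if hlt : offset < h.length then
    if pvKey h[offset] && decide (((runEnd h (pvKey h[offset]) (offset + 1) : Int) - (offset : Int)) ≥ m)
    then some (offset : Int)
    else goB h m (runEnd h (pvKey h[offset]) (offset + 1))
  else none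
termination_by h.length - offset
decreasing_by
  have := runEnd_ge h (pvKey h[offset]) (offset + 1)
  omega

def detect_sleep_onset_alt (hypnogram : List String) (min_consecutive : Int) : Option Int :=
  goB hypnogram min_consecutive 0

-- ===== PRECONDITION & SPEC =====
-- When min_consecutive ≤ 0 and a non-Wake epoch exists, A returns firstSleepIndex + 1 - min_consecutive
-- (an index past the onset, possibly out of range), while B returns the first non-Wake index itself,
-- the intended onset for a degenerate threshold.
def D_detect_sleep_onset (hypnogram : List String) (min_consecutive : Int) : Prop :=
  min_consecutive ≤ 0 ∧ ∃ s ∈ hypnogram, s ≠ "Wake"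
instance (hypnogram : List String) (min_consecutive : Int) : Decidable (D_detect_sleep_onset hypnogram min_consecutive) := by unfold D_detect_sleep_onset; infer_instance

def Spec_detect_sleep_onset (hypnogram : List String) (min_consecutive : Int) (out : Option Int) : Prop := ¬ D_detect_sleep_onset hypnogram min_consecutive → out = detect_sleep_onset_alt hypnogram min_consecutive
instance (hypnogram : List String) (min_consecutive : Int) (out : Option Int) : Decidable (Spec_detect_sleep_onset hypnogram min_consecutive out) := by unfold Spec_detect_sleep_onset; infer_instance

def pvDiffWitness_detect_sleep_onset : List String × Int := (["Wake", "N2"], 0)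
def pvDiffWitnessOut_detect_sleep_onset : (Option Int) × (Option Int) := (some 2, some 1)

-- ===== CLAIM (what is proved, stated in full; the proofs are below) =====
def Claim_unchanged_detect_sleep_onset : Prop := ∀ (hypnogram : List String) (min_consecutive : Int), Dom_detect_sleep_onset hypnogram min_consecutive → Spec_detect_sleep_onset hypnogram min_consecutive (detect_sleep_onset hypnogram min_consecutive)
def Claim_changed_detect_sleep_onset : Prop := Dom_detect_sleep_onset (pvDiffWitness_detect_sleep_onset.1) (pvDiffWitness_detect_sleep_onset.2) ∧ D_detect_sleep_onset (pvDiffWitness_detect_sleep_onset.1) (pvDiffWitness_detect_sleep_onset.2) ∧ detect_sleep_onset (pvDiffWitness_detect_sleep_onset.1) (pvDiffWitness_detect_sleep_onset.2) = pvDiffWitnessOut_detect_sleep_onset.1 ∧ detect_sleep_onset_alt (pvDiffWitness_detect_sleep_onset.1) (pvDiffWitness_detect_sleep_onset.2) = pvDiffWitnessOut_detect_sleep_onset.2 ∧ pvDiffWitnessOut_detect_sleep_onset.1 ≠ pvDiffWitnessOut_detect_sleep_onset.2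
def Claim_exact_detect_sleep_onset : Prop := ∀ (hypnogram : List String) (min_consecutive : Int), Dom_detect_sleep_onset hypnogram min_consecutive → D_detect_sleep_onset hypnogram min_consecutive → detect_sleep_onset hypnogram min_consecutive ≠ detect_sleep_onset_alt hypnogram min_consecutive

-- ===== LEMMAS AND PROOFS =====

theorem runEnd_le (h : List String) (k : Bool) (e : Nat) (he : e ≤ h.length) :
    runEnd h k e ≤ h.length := by
  unfold runEnd
  split
  · split
    · exact runEnd_le h k (e + 1) (by omega)
    · exact he
  · exact he
termination_by h.length - e

-- closed form of the inner scan: it adds the length of the matching takeWhile of the tail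
theorem runEnd_eq (h : List String) (k : Bool) (e : Nat) :
    runEnd h k e = e + ((h.drop e).takeWhile (fun s => pvKey s == k)).length := by
  unfold runEnd
  by_cases hlt : e < h.length
  · rw [dif_pos hlt]
    have hdrop : h.drop e = h[e] :: h.drop (e + 1) := (List.getElem_cons_drop hlt).symm
    rw [hdrop]
    by_cases hk : (pvKey h[e] == k) = true
    · rw [if_pos hk, List.takeWhile_cons_of_pos (p := fun s => pvKey s == k) hk, runEnd_eq h k (e + 1)]
      simp
      omega
    · rw [if_neg hk, List.takeWhile_cons_of_neg (p := fun s => pvKey s == k) (by simpa using hk)]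
      simp
  · rw [dif_neg hlt]
    rw [List.drop_eq_nil_of_le (by omega)]
    simp
termination_by h.length - e

theorem dropWhile_eq_drop {α : Type} (p : α → Bool) (l : List α) :
    l.dropWhile p = l.drop (l.takeWhile p).length := by
  induction l with
  | nil => rfl
  | cons a t ih =>
    by_cases hp : p a = true
    · rw [List.dropWhile_cons_of_pos hp, List.takeWhile_cons_of_pos hp, ih]
      simp
    · rw [List.dropWhile_cons_of_neg (by simpa using hp), List.takeWhile_cons_of_neg (by simpa using hp)]
      simp

theorem dropWhile_head_not {α : Type} (p : α → Bool) (l : List α) (s : α)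
    (hh : (l.dropWhile p).head? = some s) : p s = false := by
  induction l with
  | nil => simp at hh
  | cons a t ih =>
    by_cases hp : p a = true
    · rw [List.dropWhile_cons_of_pos hp] at hh
      exact ih hh
    · rw [List.dropWhile_cons_of_neg (by simpa using hp)] at hh
      simp at hh
      rw [← hh]
      simpa using hp

-- A skips a block of Wake epochs, resetting nothing but the index
theorem goA_wake (w : List String) (t : List String) (i m : Int)
    (hw : ∀ s ∈ w, pvKey s = false) :
    goA (w ++ t) i 0 m = goA t (i + w.length) 0 m := by
  induction w generalizing i with
  | nil => simp
  | cons a w' ih =>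
    have ha : pvKey a = false := hw a (by simp)
    have hne : (a != "Wake") = false := ha
    simp only [List.cons_append, goA, hne, Bool.false_eq_true, if_false]
    rw [ih (i + 1) (fun s hs => hw s (by simp [hs]))]
    congr 1
    push_cast [List.length_cons]
    omega

-- A inside a sleep run that reaches the threshold: returns i - c
theorem goA_run_hit (g t : List String) (i c m : Int)
    (hg : ∀ s ∈ g, pvKey s = true) (hc : c < m) (hm : m ≤ c + g.length) :
    goA (g ++ t) i c m = some (i - c) := by
  induction g generalizing i c with
  | nil =>
    push_cast [List.length_nil] at hm
    omega
  | cons a g' ih =>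
    have ha : (a != "Wake") = true := hg a (by simp)
    simp only [List.cons_append, goA, ha, if_true]
    by_cases hge : c + 1 ≥ m
    · have : m = c + 1 := by omega
      rw [if_pos hge]
      congr 1
      omega
    · rw [if_neg hge]
      have := ih (i + 1) (c + 1) (fun s hs => hg s (by simp [hs])) (by omega)
        (by push_cast [List.length_cons] at hm ⊢; omega)
      rw [this]
      congr 1
      omega

-- A inside a sleep run too short to hit the threshold: counter accumulates
theorem goA_run_miss (g t : List String) (i c m : Int)
    (hg : ∀ s ∈ g, pvKey s = true) (hm : c + g.length < m) :
    goA (g ++ t) i c m = goA t (i + g.length) (c + g.length) m := by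
  induction g generalizing i c with
  | nil => simp
  | cons a g' ih =>
    have ha : (a != "Wake") = true := hg a (by simp)
    have hlen : ((g'.length : Int) : Int) ≥ 0 := by positivity
    simp only [List.cons_append, goA, ha, if_true]
    rw [if_neg (by push_cast [List.length_cons] at hm; omega)]
    rw [ih (i + 1) (c + 1) (fun s hs => hg s (by simp [hs])) (by push_cast [List.length_cons] at hm ⊢; omega)]
    congr 1 <;> (push_cast [List.length_cons]; omega)

-- the counter is irrelevant when the next epoch (if any) is Wake
theorem goA_reset (t : List String) (i c c' m : Int)
    (hh : ∀ s, t.head? = some s → pvKey s = false) :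
    goA t i c m = goA t i c' m := by
  cases t with
  | nil => rfl
  | cons a t' =>
    have ha : (a != "Wake") = false := hh a rfl
    simp only [goA, ha, Bool.false_eq_true, if_false]

theorem goA_allwake (h : List String) (i c m : Int) (hw : ∀ s ∈ h, pvKey s = false) :
    goA h i c m = none := by
  induction h generalizing i c with
  | nil => rfl
  | cons a t ih =>
    have ha : (a != "Wake") = false := hw a (by simp)
    simp only [goA, ha, Bool.false_eq_true, if_false]
    exact ih (i + 1) 0 (fun s hs => hw s (by simp [hs]))

theorem goB_allwake (h : List String) (m : Int) (offset : Nat)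
    (hw : ∀ s ∈ h, pvKey s = false) : goB h m offset = none := by
  unfold goB
  by_cases hlt : offset < h.length
  · rw [dif_pos hlt]
    have hk : pvKey h[offset] = false := hw _ (List.getElem_mem hlt)
    rw [if_neg (by simp [hk])]
    exact goB_allwake h m _ hw
  · rw [dif_neg hlt]
termination_by h.length - offset
decreasing_by
  have := runEnd_ge h (pvKey h[offset]) (offset + 1)
  omega

-- main equivalence, threshold ≥ 1: A's counter scan of the suffix equals B's run scan from offset
theorem mainEq (h : List String) (m : Int) (hm : 1 ≤ m) (offset : Nat) (hle : offset ≤ h.length) :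
    goA (h.drop offset) (offset : Int) 0 m = goB h m offset := by
  unfold goB
  by_cases hlt : offset < h.length
  · rw [dif_pos hlt]
    set k := pvKey h[offset] with hkdef
    set run := (h.drop offset).takeWhile (fun s => pvKey s == k) with hrun
    set rest := (h.drop offset).dropWhile (fun s => pvKey s == k) with hrest
    have hdrop : h.drop offset = h[offset] :: h.drop (offset + 1) := (List.getElem_cons_drop hlt).symm
    have htw : run = h[offset] :: (h.drop (offset + 1)).takeWhile (fun s => pvKey s == k) := by
      rw [hrun, hdrop, List.takeWhile_cons_of_pos (by simp [hkdef])]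
    have he2 : runEnd h k (offset + 1) = offset + run.length := by
      rw [runEnd_eq, htw]
      simp only [List.length_cons]
      omega
    have hrunpos : 1 ≤ run.length := by rw [htw]; simp
    have hge1 : offset + 1 ≤ runEnd h k (offset + 1) := runEnd_ge h k (offset + 1)
    have hle2 : runEnd h k (offset + 1) ≤ h.length := runEnd_le h k (offset + 1) (by omega)
    have hsplit : h.drop offset = run ++ rest := (List.takeWhile_append_dropWhile).symm
    have hrestdrop : rest = h.drop (offset + run.length) := by
      rw [hrest, dropWhile_eq_drop, ← hrun, List.drop_drop]
    have hrunmem : ∀ s ∈ run, (pvKey s == k) = true := fun s hs => List.mem_takeWhile_imp (p := fun s => pvKey s == k) hs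
    have hIH : goA (h.drop (offset + run.length)) ((offset + run.length : Nat) : Int) 0 m
        = goB h m (offset + run.length) := by
      have := mainEq h m hm (runEnd h k (offset + 1)) hle2
      rw [he2] at this
      exact this
    rw [he2]
    by_cases hk : k = true
    · -- sleep run
      have hall : ∀ s ∈ run, pvKey s = true := by
        intro s hs
        have := hrunmem s hs
        rw [hk] at this
        simpa using this
      by_cases hgem : ((offset + run.length : Nat) : Int) - (offset : Int) ≥ m
      · rw [if_pos (by rw [hk]; simpa using hgem)]
        rw [hsplit]
        have := goA_run_hit run rest (offset : Int) 0 m hall (by omega) (by push_cast at hgem ⊢; omega)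
        rw [this]
        norm_num
      · rw [if_neg (by rw [hk]; simpa using hgem)]
        rw [hsplit, goA_run_miss run rest (offset : Int) 0 m hall (by push_cast at hgem ⊢; omega)]
        rw [goA_reset rest _ _ 0 m (by
          intro s hs
          have := dropWhile_head_not _ _ _ (hrest ▸ hs)
          rw [hk] at this
          simpa using this)]
        rw [hrestdrop] at *
        rw [← hIH]
        push_cast
        rfl
    · -- wake run
      rw [Bool.not_eq_true] at hk
      have hkf : k = false := hk
      have hall : ∀ s ∈ run, pvKey s = false := by
        intro s hs
        have := hrunmem s hs
        rw [hkf] at this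
        simpa using this
      rw [if_neg (by rw [hkf]; simp)]
      rw [hsplit, goA_wake run rest (offset : Int) m hall]
      rw [hrestdrop] at *
      rw [← hIH]
      push_cast
      rfl
  · rw [dif_neg hlt]
    rw [List.drop_eq_nil_of_le (by omega)]
    rfl
termination_by h.length - offset
decreasing_by
  have hx : offset + 1 ≤ runEnd h (pvKey h[offset]) (offset + 1) := runEnd_ge _ _ _
  omega

-- B with threshold ≤ 0: returns the first sleep index at or after offset, when one exists
theorem goB_deg (h : List String) (m : Int) (hm : m ≤ 0) (offset : Nat) (hle : offset ≤ h.length)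
    (hex : ∃ s ∈ h.drop offset, pvKey s = true) :
    goB h m offset
      = some ((offset : Int) + ((h.drop offset).takeWhile (fun s => pvKey s == false)).length) := by
  have hlt : offset < h.length := by
    by_contra hge
    rw [List.drop_eq_nil_of_le (by omega)] at hex
    simp at hex
  have hdrop : h.drop offset = h[offset] :: h.drop (offset + 1) := (List.getElem_cons_drop hlt).symm
  unfold goB
  rw [dif_pos hlt]
  by_cases hk : pvKey h[offset] = true
  · rw [hk]
    have hge1 := runEnd_ge h true (offset + 1)
    rw [if_pos (by
      simp only [Bool.true_and, decide_eq_true_eq]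
      have : ((runEnd h true (offset + 1) : Nat) : Int) ≥ (offset : Int) + 1 := by
        exact_mod_cast hge1
      omega)]
    have htw0 : (h.drop offset).takeWhile (fun s => pvKey s == false) = [] := by
      rw [hdrop, List.takeWhile_cons_of_neg (p := fun s => pvKey s == false) (by simp [hk])]
    rw [htw0]
    simp
  · rw [Bool.not_eq_true] at hk
    rw [hk]
    rw [if_neg (by simp)]
    set w := (h.drop offset).takeWhile (fun s => pvKey s == false) with hwdef
    have htw : w = h[offset] :: (h.drop (offset + 1)).takeWhile (fun s => pvKey s == false) := by
      rw [hwdef, hdrop, List.takeWhile_cons_of_pos (p := fun s => pvKey s == false) (by simp [hk])]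
    have he2 : runEnd h false (offset + 1) = offset + w.length := by
      rw [runEnd_eq, htw]
      simp only [List.length_cons]
      omega
    have hge1 := runEnd_ge h false (offset + 1)
    have hle2 := runEnd_le h false (offset + 1) (by omega)
    have hrestdrop : (h.drop offset).dropWhile (fun s => pvKey s == false)
        = h.drop (offset + w.length) := by
      rw [dropWhile_eq_drop, ← hwdef, List.drop_drop]
    have hex' : ∃ s ∈ h.drop (offset + w.length), pvKey s = true := by
      obtain ⟨s, hs, hst⟩ := hex
      refine ⟨s, ?_, hst⟩
      rw [← hrestdrop]
      have hsplit : h.drop offset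
          = w ++ (h.drop offset).dropWhile (fun s => pvKey s == false) :=
        (List.takeWhile_append_dropWhile).symm
      rw [hsplit] at hs
      rcases List.mem_append.mp hs with hw | hr
      · exfalso
        have := List.mem_takeWhile_imp (p := fun s => pvKey s == false) (hwdef ▸ hw)
        simp [hst] at this
      · exact hr
    have htw2 : (h.drop (offset + w.length)).takeWhile (fun s => pvKey s == false) = [] := by
      rw [← hrestdrop]
      cases hr : (h.drop offset).dropWhile (fun s => pvKey s == false) with
      | nil => rfl
      | cons a t =>
        have hpa : (pvKey a == false) = false :=
          dropWhile_head_not (fun s => pvKey s == false) (h.drop offset) a (by rw [hr]; rfl)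
        rw [List.takeWhile_cons_of_neg (p := fun s => pvKey s == false) (by simp [hpa])]
    have hIH := goB_deg h m hm (offset + w.length) (by omega) hex'
    rw [he2, hIH, htw2]
    simp only [List.length_nil, Nat.cast_add, Nat.cast_zero, add_zero]
termination_by h.length - offset
decreasing_by
  simp_wf
  have hkf : pvKey h[offset] = false := by revert hk; cases pvKey h[offset] <;> simp
  have hx : (List.takeWhile (fun s => !pvKey s) (List.drop offset h)).length ≥ 1 := by
    rw [hdrop, List.takeWhile_cons_of_pos (p := fun s => !pvKey s) (by simp [hkf])]
    simp
  omega

-- A on an input with a sleep epoch and threshold ≤ 0 overshoots by 1 - m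
theorem goA_deg (h : List String) (m : Int) (hm : m ≤ 0)
    (hex : ∃ s ∈ h, s ≠ "Wake") :
    goA h 0 0 m = some (((h.takeWhile (fun s => pvKey s == false)).length : Int) - m + 1) := by
  set pf : String → Bool := fun s => pvKey s == false with hpf
  set w := h.takeWhile pf with hw
  set rest := h.dropWhile pf with hrestdef
  have hsplit : h = w ++ rest := (List.takeWhile_append_dropWhile).symm
  have hrestne : rest ≠ [] := by
    intro hnil
    have hall : h.takeWhile pf = h := by
      have := List.takeWhile_append_dropWhile (p := pf) (l := h)
      rw [← hrestdef, hnil] at this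
      simpa using this
    obtain ⟨s, hs, hsne⟩ := hex
    have : pf s = true := List.mem_takeWhile_imp (by rw [hall]; exact hs)
    simp [hpf, pvKey] at this
    exact hsne this
  have hwall : ∀ s ∈ w, pvKey s = false := by
    intro s hs
    have := List.mem_takeWhile_imp (hw ▸ hs)
    simpa [hpf] using this
  cases hr : rest with
  | nil => exact absurd hr hrestne
  | cons a t =>
    have ha : pvKey a = true := by
      have := dropWhile_head_not pf h a (by rw [← hrestdef, hr]; rfl)
      simpa [hpf] using this
    conv_lhs => rw [hsplit, hr]
    rw [goA_wake w (a :: t) 0 m hwall]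
    have haw : (a != "Wake") = true := ha
    simp only [goA, haw, if_true]
    rw [if_pos (by omega)]
    congr 1
    omega

-- ===== VERDICT (by name: the statement is the Claim_ definition above) =====
theorem detect_sleep_onset_spec : Claim_unchanged_detect_sleep_onset := by
  intro h m _hdom hnd
  unfold detect_sleep_onset detect_sleep_onset_alt
  unfold D_detect_sleep_onset at hnd
  rw [not_and_or] at hnd
  by_cases hm : 1 ≤ m
  · have := mainEq h m hm 0 (by omega)
    simpa using this
  · have hall : ∀ s ∈ h, pvKey s = false := by
      rcases hnd with h1 | h2
      · exact absurd (by omega) h1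
      · intro s hs
        by_contra hps
        have hpt : pvKey s = true := by revert hps; cases pvKey s <;> simp
        exact h2 ⟨s, hs, by simpa [pvKey, bne_iff_ne] using hpt⟩
    rw [goA_allwake h 0 0 m hall, goB_allwake h m 0 hall]

theorem detect_sleep_onset_changed : Claim_changed_detect_sleep_onset := by
  unfold Claim_changed_detect_sleep_onset
  refine ⟨by decide, by decide, by decide, ?_, by decide⟩
  show detect_sleep_onset_alt ["Wake", "N2"] 0 = some 1
  have h1 : runEnd ["Wake", "N2"] false 1 = 1 := by
    rw [runEnd.eq_def]
    rw [dif_pos (by decide)]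
    rw [if_neg (by decide)]
  have h2 : runEnd ["Wake", "N2"] true 2 = 2 := by
    rw [runEnd.eq_def]
    rw [dif_neg (by decide)]
  have hk1 : pvKey (["Wake", "N2"][1]'(by decide)) = true := by decide
  have h3 : goB ["Wake", "N2"] 0 1 = some 1 := by
    rw [goB.eq_def]
    rw [dif_pos (by decide)]
    rw [hk1, h2]
    rw [if_pos (by decide)]
    norm_num
  have hk0 : pvKey (["Wake", "N2"][0]'(by decide)) = false := by decide
  unfold detect_sleep_onset_alt
  rw [goB.eq_def]
  rw [dif_pos (by decide)]
  rw [hk0, h1]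
  rw [if_neg (by decide)]
  exact h3

theorem detect_sleep_onset_tight : Claim_exact_detect_sleep_onset := by
  intro h m _hdom hd
  obtain ⟨hm, hex⟩ := hd
  have hex' : ∃ s ∈ h.drop 0, pvKey s = true := by
    obtain ⟨s, hs, hsne⟩ := hex
    exact ⟨s, by simpa using hs, by simp [pvKey, hsne]⟩
  unfold detect_sleep_onset detect_sleep_onset_alt
  rw [goA_deg h m hm hex, goB_deg h m hm 0 (by omega) hex']
  simp only [List.drop_zero]
  intro hcontra
  rw [Option.some.injEq] at hcontra
  omega
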